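-- pv_equiv track=rewrite | github.com/Miguel477713/PrecedenceRelationsOfTraces | automatav5.py | UnfoldOneCycleAutomatically
-- ===== SOURCE A (Python) =====
-- from typing import Dict, FrozenSet, List, Optional, Sequence, Set, Tuple
--
-- def FindOneDirectedCycle(edges: Set[Tuple[str, str]], preferredOrder: List[str] = None) -> Optional[List[str]]:
--     """
--     Detects a cycle.
--     If preferredOrder is provided, it iterates start nodes in that order.
--     This allows us to prioritize unfolding 'P' over 'N' if 'P' appeared first in traces.
--     """
--     adj = {}
--     nodes = set()
--     for u, v in edges:
--         adj.setdefault(u, []).append(v)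
--         nodes.add(u);
--         nodes.add(v)
--
--     # Sort adjacency lists for deterministic behavior within neighbor selection
--     for u in adj: adj[u].sort()
--
--     # Determine iteration order for Start Nodes
--     if preferredOrder:
--         # Filter preferredOrder to only include nodes actually in the graph
--         node_order = [n for n in preferredOrder if n in nodes]
--         # Append any remaining nodes (like duplicates created later) sorted alphabetically
--         remaining = sorted(list(nodes.difference(set(node_order))))
--         node_order.extend(remaining)
--     else:
--         node_order = sorted(list(nodes))
--
--     visit = {n: 0 for n in nodes}  # 0=new, 1=visiting, 2=done
--     parent = {n: None for n in nodes}
--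
--     for start in node_order:
--         if visit[start] != 0: continue
--         stack = [(start, 0)]  # node, neighbor_idx
--         visit[start] = 1
--
--         while stack:
--             u, idx = stack[-1]
--             neighbors = adj.get(u, [])
--             if idx >= len(neighbors):
--                 visit[u] = 2
--                 stack.pop()
--                 continue
--
--             stack[-1] = (u, idx + 1)
--             v = neighbors[idx]
--
--             if visit.get(v, 0) == 1:  # Cycle detected
--                 path = [u]
--                 curr = u
--                 while curr != v and curr is not None:
--                     curr = parent[curr]
--                     if curr is not None: path.append(curr)
--                 path.reverse()
--                 return path + [v]
--             elif visit.get(v, 0) == 0: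
--                 visit[v] = 1
--                 parent[v] = u
--                 stack.append((v, 0))
--     return None
--
-- def CreateUniqueDuplicateNodeName(originalNodeName: str, usedNodeNames: Set[str]) -> str:
--     duplicateIndex = 1
--     while True:
--         candidateName = f"{originalNodeName}Prime{duplicateIndex}"
--         if candidateName not in usedNodeNames:
--             return candidateName
--         duplicateIndex += 1
--
-- def UnfoldOneCycleAutomatically(
--         edges: Set[Tuple[str, str]],
--         usedNodeNames: Set[str],
--         preferredOrder: List[str]
-- ) -> Tuple[Set[Tuple[str, str]], Optional[str]]:
--     cycle = FindOneDirectedCycle(edges, preferredOrder)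
--     if cycle is None:
--         return (set(edges), None)
--
--     # The entry node is the first node in the detected cycle list
--     cycleEntryNode = cycle[0]
--     duplicateNodeName = CreateUniqueDuplicateNodeName(cycleEntryNode, usedNodeNames)
--
--     cycleEdges: List[Tuple[str, str]] = []
--     for index in range(len(cycle) - 1):
--         cycleEdges.append((cycle[index], cycle[index + 1]))
--
--     closingEdge = cycleEdges[-1]  # ( ... -> cycleEntryNode )
--
--     newEdges: Set[Tuple[str, str]] = set(edges)
--
--     if closingEdge in newEdges:
--         newEdges.remove(closingEdge)
--
--     newEdges.add((closingEdge[0], duplicateNodeName))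
--
--     usedNodeNames.add(duplicateNodeName)
--     return (newEdges, duplicateNodeName)
-- ===== SOURCE B (Python) =====
-- def UnfoldOneCycleAutomatically(edges, usedNodeNames, preferredOrder):
--     cycle = _FindDirectedCycle(edges, preferredOrder)
--     if cycle is None:
--         return (set(edges), None)
--
--     entry = cycle[0]
--     i = 1
--     while f"{entry}Prime{i}" in usedNodeNames:
--         i += 1
--     duplicateNodeName = f"{entry}Prime{i}"
--
--     # the closing edge of the cycle is simply its last two entries
--     closingTail = cycle[-2]
--     newEdges = {e for e in edges if e != (closingTail, cycle[-1])}
--     newEdges.add((closingTail, duplicateNodeName))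
--
--     usedNodeNames.add(duplicateNodeName)
--     return (newEdges, duplicateNodeName)
--
--
-- def _FindDirectedCycle(edges, preferredOrder):
--     # neighbours computed on demand, no adjacency dict
--     def nbrs(u):
--         return sorted(v for x, v in edges if x == u)
--
--     nodes = {x for e in edges for x in e}
--     if preferredOrder:
--         order = [n for n in preferredOrder if n in nodes]
--         order += sorted(nodes - set(preferredOrder))
--     else:
--         order = sorted(nodes)
--
--     visit = {}   # absent = new; 1 = visiting; 2 = done
--     parent = {}
--
--     def dfs(u):
--         # recursive DFS: returns the detected back edge (v, u) or None
--         for v in nbrs(u):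
--             state = visit.get(v, 0)
--             if state == 1:
--                 return (v, u)
--             if state == 0:
--                 visit[v] = 1
--                 parent[v] = u
--                 found = dfs(v)
--                 if found is not None:
--                     return found
--         visit[u] = 2
--         return None
--
--     for start in order:
--         if visit.get(start, 0) != 0:
--             continue
--         visit[start] = 1
--         hit = dfs(start)
--         if hit is not None:
--             v, u = hit
--             # reconstruct the cycle by walking parents from u back to v
--             rev = []
--             curr = u
--             while curr is not None and curr != v:
--                 rev.append(curr)
--                 curr = parent.get(curr)
--             if curr == v:
--                 return [v] + rev[::-1] + [v]
--             return rev[::-1] + [v]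
--     return None
-- ===== Notes on version B (the rewrite author's own statement) =====
-- stated objective: alternative
-- what changed: Cycle search is a recursive DFS (call-stack recursion returning the detected back edge, with the cycle reconstructed afterwards by one parent walk) instead of A's explicit (node, neighbour-index) frame-stack loop that builds the path at the detection site; …
import Mathlib
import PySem

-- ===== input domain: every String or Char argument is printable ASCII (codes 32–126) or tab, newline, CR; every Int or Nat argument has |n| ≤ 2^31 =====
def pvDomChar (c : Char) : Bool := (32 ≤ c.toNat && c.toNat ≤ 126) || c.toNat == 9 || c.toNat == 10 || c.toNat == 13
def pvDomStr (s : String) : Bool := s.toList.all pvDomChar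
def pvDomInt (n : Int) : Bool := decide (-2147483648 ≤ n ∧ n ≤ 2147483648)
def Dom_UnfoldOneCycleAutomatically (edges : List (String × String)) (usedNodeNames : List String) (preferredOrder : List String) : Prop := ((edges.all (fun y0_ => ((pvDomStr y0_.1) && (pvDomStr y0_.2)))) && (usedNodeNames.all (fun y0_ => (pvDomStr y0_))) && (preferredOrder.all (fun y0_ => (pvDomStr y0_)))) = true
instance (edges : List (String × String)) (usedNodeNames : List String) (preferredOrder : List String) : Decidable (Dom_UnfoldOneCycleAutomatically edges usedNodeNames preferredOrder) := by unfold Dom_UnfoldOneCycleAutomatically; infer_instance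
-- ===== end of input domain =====

-- B replaces A's explicit (node, neighbour-index) frame-stack DFS by a recursive DFS that
-- returns the detected back edge and reconstructs the cycle afterwards by one parent walk;
-- neighbour lists are computed on demand by a sorted comprehension instead of a prebuilt
-- adjacency dict, visit/parent are lazily-defaulted dicts instead of pre-initialised ones,
-- and the glue reads the closing edge from the cycle's last two entries and filters it out
-- instead of building all consecutive pairs and copy-then-remove.  Objective: alternative
-- decomposition (no speed claim).  Python A mutates usedNodeNames in place (adds the
-- duplicate name) and B performs the same mutation; the theorems are about the RETURN
-- value.  All fuel arguments below are totality guards only, generous enough never to run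
-- out on the Python-reachable states.

-- ===== PORT A =====
-- adjacency dict: setdefault-append loop, then an in-place sort of every value
def pvAdj (edges : List (String × String)) : PySem.Dict String (List String) :=
  let raw := edges.foldl (fun d p => d.modify p.1 [] (fun l => l ++ [p.2])) PySem.Dict.empty
  raw.keys.foldl (fun d u => d.modify u [] (fun l => PySem.List.sorted l (fun x => x) false)) raw

def pvNodes (edges : List (String × String)) : PySem.Set String :=
  edges.foldl (fun s p => PySem.Set.add (PySem.Set.add s p.1) p.2) PySem.Set.empty

-- the 'while curr != v and curr is not None' parent walk at A's detection site
-- (fuel-guarded; a missing parent entry reads as None)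
def pvBuildPath (parent : PySem.Dict String (Option String)) : Nat → String → String → List String → List String
  | 0, _, _, path => path
  | f + 1, v, curr, path =>
      if curr == v then path
      else match parent.getD curr none with
        | none => path
        | some c => pvBuildPath parent f v c (path ++ [c])

-- A's node_order: filter preferredOrder to graph nodes, then the remaining nodes sorted
def pvNodeOrderA (nodes : PySem.Set String) (preferredOrder : List String) : List String :=
  if preferredOrder.isEmpty then PySem.List.sorted nodes (fun x => x) false
  else
    let no := preferredOrder.filter (fun n => PySem.Set.contains nodes n)
    no ++ PySem.List.sorted (PySem.Set.diff nodes (PySem.Set.ofList no)) (fun x => x) false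

-- A's explicit (node, neighbour-index) frame stack DFS; outer start loop fused in so the
-- updated visit/parent dicts flow from one start to the next exactly as in the Python
def pvRunA (adj : PySem.Dict String (List String)) (pf : Nat) :
    Nat → List String → List (String × Nat) → PySem.Dict String Int → PySem.Dict String (Option String) → Option (List String)
  | 0, _, _, _, _ => none
  | f + 1, starts, [], visit, parent =>
      match starts with
      | [] => none
      | s :: rest =>
          if visit.getD s 0 ≠ 0 then pvRunA adj pf f rest [] visit parent
          else pvRunA adj pf f rest [(s, 0)] (visit.insert s 1) parent
  | f + 1, starts, (u, i) :: st, visit, parent =>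
      let ns := adj.getD u []
      if ns.length ≤ i then pvRunA adj pf f starts st (visit.insert u 2) parent
      else
        let v := ns.getD i ""
        if visit.getD v 0 = 1 then
          some ((pvBuildPath parent pf v u [u]).reverse ++ [v])
        else if visit.getD v 0 = 0 then
          pvRunA adj pf f starts ((v, 0) :: (u, i + 1) :: st) (visit.insert v 1) (parent.insert v u)
        else pvRunA adj pf f starts ((u, i + 1) :: st) visit parent

-- A's CreateUniqueDuplicateNodeName: while True over candidate names
def pvFreshA (used : List String) (name : String) : Nat → Int → String
  | 0, i => name ++ "Prime" ++ PySem.Int.toStr i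
  | f + 1, i =>
      let c := name ++ "Prime" ++ PySem.Int.toStr i
      if used.contains c then pvFreshA used name f (i + 1) else c

def pvFindCycleA (edges : List (String × String)) (preferredOrder : List String) : Option (List String) :=
  let adj := pvAdj edges
  let nodes := pvNodes edges
  let order := pvNodeOrderA nodes preferredOrder
  let visit := nodes.foldl (fun d n => d.insert n (0 : Int)) PySem.Dict.empty
  let parent := nodes.foldl (fun d n => d.insert n (none : Option String)) PySem.Dict.empty
  pvRunA adj (nodes.length + 1) (3 * (edges.length + nodes.length + preferredOrder.length) + 3) order [] visit parent

def UnfoldOneCycleAutomatically (edges : List (String × String)) (usedNodeNames : List String) (preferredOrder : List String) : (List (String × String)) × Option String :=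
  match pvFindCycleA edges preferredOrder with
  | none => (PySem.Set.ofList edges, none)
  | some cycle =>
      let entry := cycle.getD 0 ""             -- cycle[0]; a returned cycle is never empty
      let dup := pvFreshA usedNodeNames entry (usedNodeNames.length + 1) 1
      let cycleEdges := (PySem.List.pyRange 0 ((cycle.length : Int) - 1) 1).foldl
          (fun acc i => acc ++ [(PySem.List.pyGetD cycle i "", PySem.List.pyGetD cycle (i + 1) "")]) []
      let closing := (PySem.List.pyGet? cycleEdges (-1)).getD ("", "")   -- cycleEdges[-1]; nonempty since the cycle has ≥ 2 entries
      let ne := PySem.Set.ofList edges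
      let ne' := if PySem.Set.contains ne closing then PySem.Set.discard ne closing else ne
      (PySem.Set.add ne' (closing.1, dup), some dup)

-- ===== PORT B =====
-- B's on-demand neighbour list: sorted(v for x, v in edges if x == u)
def pvNbrsB (edges : List (String × String)) (u : String) : List String :=
  PySem.List.sorted (edges.filterMap (fun p => if p.1 == u then some p.2 else none)) (fun x => x) false

-- B's node set comprehension {x for e in edges for x in e}
def pvNodesB (edges : List (String × String)) : PySem.Set String :=
  PySem.Set.ofList (edges.flatMap (fun p => [p.1, p.2]))

-- B's node_order (difference taken against set(preferredOrder) directly)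
def pvNodeOrderB (nodes : PySem.Set String) (preferredOrder : List String) : List String :=
  if preferredOrder.isEmpty then PySem.List.sorted nodes (fun x => x) false
  else (preferredOrder.filter (fun n => PySem.Set.contains nodes n)) ++
       PySem.List.sorted (PySem.Set.diff nodes (PySem.Set.ofList preferredOrder)) (fun x => x) false

-- B's parent walk after detection: collect the chain from u towards v, then assemble
def pvWalkB (parent : PySem.Dict String (Option String)) : Nat → String → Option String → List String → (List String × Bool)
  | _, _, none, rev => (rev, false)
  | 0, _, some c, rev => (rev ++ [c], false)          -- fuel guard only; never reached in a full run
  | f + 1, v, some c, rev =>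
      if c == v then (rev, true) else pvWalkB parent f v (parent.getD c none) (rev ++ [c])

def pvAssembleB (parent : PySem.Dict String (Option String)) (pf : Nat) (v u : String) : List String :=
  match pvWalkB parent pf v (some u) [] with
  | (rev, true) => [v] ++ rev.reverse ++ [v]
  | (rev, false) => rev.reverse ++ [v]

-- dfs exit: mark u done and hand the remaining fuel back (the fuel-0 arm is a guard only)
def pvExitB (u : String) (t : Option (String × String) × PySem.Dict String Int × PySem.Dict String (Option String) × Nat) :
    Option (String × String) × PySem.Dict String Int × PySem.Dict String (Option String) × Nat :=
  match t with
  | (some r, vis, par, f) => (some r, vis, par, f)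
  | (none, vis, par, 0) => (none, vis, par, 0)
  | (none, vis, par, g + 1) => (none, vis.insert u 2, par, g)

-- B's recursive DFS: dfs(u) iterates nbrs(u), recursing into new nodes and returning the
-- back edge (v, u) on a 'visiting' neighbour.  The fuel is threaded through and clamped
-- with min (a totality guard: a call never returns more fuel than it was given).
mutual
def pvDfsB (edges : List (String × String)) (f : Nat) (u : String)
    (vis : PySem.Dict String Int) (par : PySem.Dict String (Option String)) :
    Option (String × String) × PySem.Dict String Int × PySem.Dict String (Option String) × Nat :=
  pvExitB u (pvLoopB edges f u (pvNbrsB edges u) vis par)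
termination_by (f, 1)

def pvLoopB (edges : List (String × String)) :
    Nat → String → List String → PySem.Dict String Int → PySem.Dict String (Option String) →
    Option (String × String) × PySem.Dict String Int × PySem.Dict String (Option String) × Nat
  | f, _, [], vis, par => (none, vis, par, f)
  | 0, _, _ :: _, vis, par => (none, vis, par, 0)
  | f + 1, u, v :: vs, vis, par =>
      if vis.getD v 0 = 1 then (some (v, u), vis, par, f + 1)
      else if vis.getD v 0 = 0 then
        match pvDfsB edges f v (vis.insert v 1) (par.insert v u) with
        | (some r, vis', par', f') => (some r, vis', par', f')
        | (none, vis', par', f') => pvLoopB edges (min f' f) u vs vis' par'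
      else pvLoopB edges f u vs vis par
termination_by f _ _ _ _ => (f, 0)
end

-- B's fresh-name search returns the first free index
def pvFreshIdxB (used : List String) (name : String) : Nat → Int → Int
  | 0, i => i
  | f + 1, i =>
      if used.contains (name ++ "Prime" ++ PySem.Int.toStr i) then pvFreshIdxB used name f (i + 1) else i

-- B's outer loop over the start nodes; on a hit, reconstruct the cycle from the parents
def pvStartsB (edges : List (String × String)) (pf : Nat) :
    Nat → List String → PySem.Dict String Int → PySem.Dict String (Option String) → Option (List String)
  | 0, _, _, _ => none
  | _ + 1, [], _, _ => none
  | f + 1, s :: rest, vis, par =>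
      if vis.getD s 0 ≠ 0 then pvStartsB edges pf f rest vis par
      else
        match pvDfsB edges f s (vis.insert s 1) par with
        | (some (v, u), _, par', _) => some (pvAssembleB par' pf v u)
        | (none, vis', par', f') => pvStartsB edges pf (min f' f) rest vis' par'
termination_by f _ _ _ => f

def pvFindCycleB (edges : List (String × String)) (preferredOrder : List String) : Option (List String) :=
  let nodes := pvNodesB edges
  let order := pvNodeOrderB nodes preferredOrder
  pvStartsB edges (nodes.length + 1) (3 * (edges.length + nodes.length + preferredOrder.length) + 3) order PySem.Dict.empty PySem.Dict.empty

def UnfoldOneCycleAutomatically_alt (edges : List (String × String)) (usedNodeNames : List String) (preferredOrder : List String) : (List (String × String)) × Option String :=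
  match pvFindCycleB edges preferredOrder with
  | none => (PySem.Set.ofList edges, none)
  | some cycle =>
      let entry := (PySem.List.pyGet? cycle 0).getD ""
      let i := pvFreshIdxB usedNodeNames entry (usedNodeNames.length + 1) 1
      let dup := entry ++ "Prime" ++ PySem.Int.toStr i
      let closing := ((PySem.List.pyGet? cycle (-2)).getD "", (PySem.List.pyGet? cycle (-1)).getD "")
      (PySem.Set.add (PySem.Set.ofList (edges.filter (fun e => !(e == closing)))) (closing.1, dup), some dup)

-- ===== PRECONDITION & SPEC =====
def Spec_UnfoldOneCycleAutomatically (edges : List (String × String)) (usedNodeNames : List String) (preferredOrder : List String) (out : (List (String × String)) × Option String) : Prop := out = UnfoldOneCycleAutomatically_alt edges usedNodeNames preferredOrder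
instance (edges : List (String × String)) (usedNodeNames : List String) (preferredOrder : List String) (out : (List (String × String)) × Option String) : Decidable (Spec_UnfoldOneCycleAutomatically edges usedNodeNames preferredOrder out) := by unfold Spec_UnfoldOneCycleAutomatically; infer_instance

-- ===== CLAIM (what is proved, stated in full; the proofs are below) =====
def Claim_equal_UnfoldOneCycleAutomatically : Prop := ∀ (edges : List (String × String)) (usedNodeNames : List String) (preferredOrder : List String), Dom_UnfoldOneCycleAutomatically edges usedNodeNames preferredOrder → Spec_UnfoldOneCycleAutomatically edges usedNodeNames preferredOrder (UnfoldOneCycleAutomatically edges usedNodeNames preferredOrder)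

-- ===== LEMMAS AND PROOFS =====

-- the two node-set constructions build the same list
theorem pvNodes_eq (edges : List (String × String)) : pvNodes edges = pvNodesB edges := by
  have haux : ∀ (l : List (String × String)) (acc : PySem.Set String),
      l.foldl (fun s p => PySem.Set.add (PySem.Set.add s p.1) p.2) acc
        = (l.flatMap (fun p => [p.1, p.2])).foldl PySem.Set.add acc := by
    intro l
    induction l with
    | nil => intro acc; rfl
    | cons p l ih => intro acc; simp [List.flatMap_cons, ih]
  rw [pvNodes, pvNodesB, PySem.Set.ofList_eq_foldl, haux]
  rfl

-- A's adjacency dict looked up at u is exactly B's on-demand neighbour list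
theorem pvAdj_getD (edges : List (String × String)) (u : String) :
    (pvAdj edges).getD u [] = pvNbrsB edges u := by
  have hsortpass : ∀ (l : List String), l.Nodup → ∀ (d : PySem.Dict String (List String)) (x : String),
      (l.foldl (fun d u => d.modify u [] (fun v => PySem.List.sorted v (fun y => y) false)) d).getD x []
        = if x ∈ l then PySem.List.sorted (d.getD x []) (fun y => y) false else d.getD x [] := by
    intro l
    induction l with
    | nil => intro _ d x; simp
    | cons n l ih =>
        intro hnd d x
        rcases List.nodup_cons.mp hnd with ⟨hn, hl⟩
        simp only [List.foldl_cons]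
        rw [ih hl, PySem.Dict.getD_modify]
        by_cases hx : x = n
        · subst hx
          rw [if_neg hn, if_pos rfl, if_pos (by simp)]
        · rw [if_neg hx]
          by_cases hxl : x ∈ l
          · rw [if_pos hxl, if_pos (by simp [hxl])]
          · rw [if_neg hxl, if_neg (by simp [hx, hxl])]
  have hfm : edges.filterMap (fun p => if p.1 == u then some p.2 else none)
      = (edges.filter (fun p => p.1 == u)).map (fun x => x.2) := by
    induction edges with
    | nil => rfl
    | cons p l ih =>
        by_cases hp : p.1 = u
        · simp [hp]
          simpa using ih
        · simp [hp]
          simpa using ih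
  rw [pvAdj, pvNbrsB]
  set raw := edges.foldl (fun d p => d.modify p.1 [] (fun l => l ++ [p.2])) PySem.Dict.empty with hrawdef
  have hraw : ∀ x, raw.getD x [] = (edges.filter (fun p => p.1 == x)).map (fun y => y.2) := by
    intro x
    rw [hrawdef, PySem.Dict.getD_foldl_modify_append, PySem.Dict.getD_empty, List.nil_append]
  have hkeys : raw.keys = PySem.Set.ofList (edges.map Prod.fst) := by
    rw [hrawdef, PySem.Dict.keys_foldl_modify_key edges Prod.fst [] (fun _ p => fun v => v ++ [p.2]) PySem.Dict.empty]
    rw [PySem.Set.ofList_eq_foldl]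
    rfl
  rw [hsortpass raw.keys (by rw [hkeys]; exact PySem.Set.nodup_ofList _) raw u, hfm, hraw u]
  by_cases hu : u ∈ raw.keys
  · rw [if_pos hu]
  · rw [if_neg hu]
    have hfe : edges.filter (fun p => p.1 == u) = [] := by
      rw [List.filter_eq_nil_iff]
      intro p hp hbeq
      exact hu (by
        rw [hkeys, PySem.Set.mem_ofList]
        exact List.mem_map.mpr ⟨p, hp, eq_of_beq hbeq⟩)
    rw [hfe]
    rfl

-- the two node orders coincide
theorem pvNodeOrder_eq (nodes : PySem.Set String) (preferredOrder : List String) :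
    pvNodeOrderA nodes preferredOrder = pvNodeOrderB nodes preferredOrder := by
  unfold pvNodeOrderA pvNodeOrderB
  split
  · rfl
  · dsimp only
    congr 2
    unfold PySem.Set.diff
    refine List.filter_congr (fun x hx => ?_)
    congr 1
    unfold PySem.Set.contains
    have h1 : ∀ (l : List String), (PySem.Set.ofList l).contains x = decide (x ∈ l) := by
      intro l
      unfold PySem.Set.contains
      rw [List.contains_eq_mem]
      simp [PySem.Set.mem_ofList]
    unfold PySem.Set.contains at h1
    rw [h1, h1]
    simp only [List.mem_filter]
    simp only [List.contains_eq_mem]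
    simp only [decide_eq_true_eq]
    congr 1
    simp only [eq_iff_iff]
    exact ⟨fun h => h.1, fun h => ⟨h, by simpa using hx⟩⟩

-- the two fresh-name searches coincide
theorem pvFresh_eq (used : List String) (name : String) :
    ∀ (f : Nat) (i : Int), pvFreshA used name f i = name ++ "Prime" ++ PySem.Int.toStr (pvFreshIdxB used name f i) := by
  intro f
  induction f with
  | zero => intros; rfl
  | succ f ih =>
      intro i
      simp only [pvFreshA, pvFreshIdxB]
      split <;> simp [ih]

-- A's path construction at the detection site equals B's collect-then-assemble walk
theorem pvPath_eq (pA pB : PySem.Dict String (Option String))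
    (h : ∀ n, pA.getD n none = pB.getD n none) :
    ∀ (f : Nat) (v c : String) (rev : List String),
      (pvBuildPath pA f v c (rev ++ [c])).reverse ++ [v]
        = (match pvWalkB pB f v (some c) rev with
           | (r, true) => [v] ++ r.reverse ++ [v]
           | (r, false) => r.reverse ++ [v]) := by
  intro f
  induction f with
  | zero => intro v c rev; simp [pvBuildPath, pvWalkB]
  | succ f ih =>
      intro v c rev
      simp only [pvBuildPath, pvWalkB]
      by_cases hc : c == v
      · have hcv : c = v := eq_of_beq hc
        subst hcv
        simp
      · rw [if_neg hc, if_neg hc, h c]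
        cases hp : pB.getD c none with
        | none => simp [pvWalkB]
        | some c' =>
            have := ih v c' (rev ++ [c])
            simpa using this

-- B's dfs hands back at most the fuel it was given
theorem pvFuel_le (edges : List (String × String)) :
    ∀ (f : Nat), (∀ (u : String) (l : List String) vis par, (pvLoopB edges f u l vis par).2.2.2 ≤ f)
      ∧ (∀ (u : String) vis par, (pvDfsB edges f u vis par).2.2.2 ≤ f) := by
  intro f
  induction f using Nat.strong_induction_on with
  | _ f ih =>
    have hloop : ∀ (u : String) (l : List String) vis par, (pvLoopB edges f u l vis par).2.2.2 ≤ f := by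
      intro u l vis par
      cases l with
      | nil => simp [pvLoopB]
      | cons v vs =>
          cases f with
          | zero => simp [pvLoopB]
          | succ g =>
              simp only [pvLoopB]
              split
              · simp
              · split
                · rcases hd : pvDfsB edges g v (vis.insert v 1) (par.insert v u) with ⟨res, vis', par', f'⟩
                  cases res with
                  | some r =>
                      have h2 := (ih g (by omega)).2 v (vis.insert v 1) (par.insert v u)
                      rw [hd] at h2
                      simp at h2 ⊢
                      omega
                  | none =>
                      exact le_trans ((ih (min f' g) (by omega)).1 u vs vis' par') (by omega)
                · exact le_trans ((ih g (by omega)).1 u vs vis par) (by omega)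
    refine ⟨hloop, ?_⟩
    intro u vis par
    rw [pvDfsB]
    rcases hl : pvLoopB edges f u (pvNbrsB edges u) vis par with ⟨res, vis', par', f'⟩
    have hf' : f' ≤ f := by have := hloop u (pvNbrsB edges u) vis par; rw [hl] at this; exact this
    cases res with
    | some r => simpa [pvExitB] using hf'
    | none =>
        cases f' with
        | zero => simp [pvExitB]
        | succ g => simp [pvExitB]; omega

-- A's frame stack viewed as B's pending recursive calls (proof-only continuation)
def pvDfsFromB (edges : List (String × String)) (f : Nat) (u : String) (rest : List String)
    (vis : PySem.Dict String Int) (par : PySem.Dict String (Option String)) :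
    Option (String × String) × PySem.Dict String Int × PySem.Dict String (Option String) × Nat :=
  pvExitB u (pvLoopB edges f u rest vis par)

def pvCont (edges : List (String × String)) (pf : Nat) :
    List (String × Nat) → List String →
    Option (String × String) × PySem.Dict String Int × PySem.Dict String (Option String) × Nat → Option (List String)
  | _, _, (some (v, u), _, par, _) => some (pvAssembleB par pf v u)
  | [], starts, (none, vis, par, f) => pvStartsB edges pf f starts vis par
  | (u, i) :: st, starts, (none, vis, par, f) =>
      pvCont edges pf st starts (pvDfsFromB edges f u ((pvNbrsB edges u).drop i) vis par)

theorem pvCont_zero (edges : List (String × String)) (pf : Nat) :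
    ∀ (st : List (String × Nat)) (starts : List String) vis par,
      pvCont edges pf st starts (none, vis, par, 0) = none := by
  have hl0 : ∀ (u : String) (l : List String) vis par, pvLoopB edges 0 u l vis par = (none, vis, par, 0) := by
    intro u l vis par; cases l <;> simp [pvLoopB]
  intro st
  induction st with
  | nil => intro starts vis par; simp [pvCont, pvStartsB]
  | cons p st ih =>
      rcases p with ⟨u, i⟩
      intro starts vis par
      simp only [pvCont, pvDfsFromB, hl0, pvExitB]
      exact ih starts vis par

theorem pv_insert_getD_congr {ν : Type} (vA vB : PySem.Dict String ν) (d0 w : ν) (k : String)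
    (hv : ∀ n, vA.getD n d0 = vB.getD n d0) :
    ∀ n, (vA.insert k w).getD n d0 = (vB.insert k w).getD n d0 := by
  intro n
  rw [PySem.Dict.getD_insert, PySem.Dict.getD_insert, hv n]

-- lockstep: A's frame machine equals B's recursion resumed from the stack's pending frames
theorem pvLockstep (edges : List (String × String)) (pf : Nat) :
    ∀ (f : Nat) (starts : List String) (st : List (String × Nat))
      (visA visB : PySem.Dict String Int) (parA parB : PySem.Dict String (Option String)),
      (∀ n, visA.getD n 0 = visB.getD n 0) → (∀ n, parA.getD n none = parB.getD n none) →
      pvRunA (pvAdj edges) pf f starts st visA parA = pvCont edges pf st starts (none, visB, parB, f) := by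
  have hn : ∀ u, (pvAdj edges).getD u [] = pvNbrsB edges u := pvAdj_getD edges
  have hC2 : ∀ (starts : List String) t, pvCont edges pf [] starts t
      = (match t with
         | (some (v, u), _, par', _) => some (pvAssembleB par' pf v u)
         | (none, vis', par', f') => pvStartsB edges pf f' starts vis' par') := by
    intro starts t
    rcases t with ⟨res, vis', par', f'⟩
    cases res with
    | none => simp [pvCont]
    | some r => rcases r with ⟨v, u⟩; simp [pvCont]
  have hfrom0 : ∀ (g : Nat) (u : String) vis par,
      pvDfsFromB edges g u ((pvNbrsB edges u).drop 0) vis par = pvDfsB edges g u vis par := by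
    intro g u vis par
    rw [List.drop_zero, pvDfsFromB, pvDfsB]
  intro f
  induction f with
  | zero =>
      intro starts st visA visB parA parB hv hp
      rw [pvCont_zero]
      simp [pvRunA]
  | succ f ih =>
      intro starts st visA visB parA parB hv hp
      cases st with
      | nil =>
          cases starts with
          | nil => simp [pvRunA, pvCont, pvStartsB]
          | cons s rest =>
              simp only [pvRunA]
              rw [hv s]
              by_cases hs : visB.getD s 0 ≠ 0
              · rw [if_pos hs, ih rest [] visA visB parA parB hv hp]
                simp [pvCont, pvStartsB, hs]
              · rw [if_neg hs,
                    ih rest [(s, 0)] (visA.insert s 1) (visB.insert s 1) parA parB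
                      (pv_insert_getD_congr _ _ _ _ _ hv) hp,
                    show pvCont edges pf [(s, 0)] rest (none, visB.insert s 1, parB, f)
                      = pvCont edges pf [] rest (pvDfsFromB edges f s ((pvNbrsB edges s).drop 0) (visB.insert s 1) parB) from by simp [pvCont],
                    hfrom0, hC2, hC2]
                dsimp only
                simp only [pvStartsB]
                rw [if_neg hs]
                rcases hd : pvDfsB edges f s (visB.insert s 1) parB with ⟨res, vis', par', f'⟩
                have hf' : f' ≤ f := by
                  have := ((pvFuel_le edges f).2 s (visB.insert s 1) parB)
                  rw [hd] at this
                  exact this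
                cases res with
                | some r => rcases r with ⟨v, u⟩; rfl
                | none => simp [Nat.min_eq_left hf']
      | cons p st' =>
          rcases p with ⟨u, i⟩
          simp only [pvRunA, hn u]
          have hCframe : ∀ (j : Nat) (g : Nat) vis par,
              pvCont edges pf ((u, j) :: st') starts (none, vis, par, g)
                = pvCont edges pf st' starts (pvDfsFromB edges g u ((pvNbrsB edges u).drop j) vis par) := by
            intro j g vis par; simp [pvCont]
          by_cases hlen : (pvNbrsB edges u).length ≤ i
          · rw [if_pos hlen, ih starts st' (visA.insert u 2) (visB.insert u 2) parA parB
                  (pv_insert_getD_congr _ _ _ _ _ hv) hp,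
                hCframe, List.drop_eq_nil_of_le hlen, pvDfsFromB,
                show pvLoopB edges (f + 1) u [] visB parB = (none, visB, parB, f + 1) from by simp [pvLoopB]]
            rfl
          · rw [if_neg hlen]
            rw [Nat.not_le] at hlen
            have hdrop : (pvNbrsB edges u).drop i
                = (pvNbrsB edges u).getD i "" :: (pvNbrsB edges u).drop (i + 1) := by
              rw [List.drop_eq_getElem_cons hlen, List.getD_eq_getElem _ _ hlen]
            set v := (pvNbrsB edges u).getD i "" with hvdef
            rw [hv v]
            by_cases h1 : visB.getD v 0 = 1
            · rw [if_pos h1, hCframe, hdrop, pvDfsFromB,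
                  show pvLoopB edges (f + 1) u (v :: (pvNbrsB edges u).drop (i + 1)) visB parB
                    = (some (v, u), visB, parB, f + 1) from by simp [pvLoopB, h1],
                  show pvExitB u ((some (v, u) : Option (String × String)), visB, parB, f + 1)
                    = ((some (v, u) : Option (String × String)), visB, parB, f + 1) from rfl,
                  show pvCont edges pf st' starts ((some (v, u) : Option (String × String)), visB, parB, f + 1)
                    = some (pvAssembleB parB pf v u) from by simp [pvCont]]
              have := pvPath_eq parA parB hp pf v u []
              simp only [List.nil_append] at this
              rw [this, pvAssembleB]
            · rw [if_neg h1]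
              by_cases h0 : visB.getD v 0 = 0
              · rw [if_pos h0,
                    ih starts ((v, 0) :: (u, i + 1) :: st') (visA.insert v 1) (visB.insert v 1)
                      (parA.insert v u) (parB.insert v u)
                      (pv_insert_getD_congr _ _ _ _ _ hv) (pv_insert_getD_congr _ _ _ _ _ hp),
                    show pvCont edges pf ((v, 0) :: (u, i + 1) :: st') starts (none, visB.insert v 1, parB.insert v u, f)
                      = pvCont edges pf ((u, i + 1) :: st') starts
                          (pvDfsFromB edges f v ((pvNbrsB edges v).drop 0) (visB.insert v 1) (parB.insert v u)) from by simp [pvCont],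
                    hfrom0, hCframe i, hdrop, pvDfsFromB,
                    show pvLoopB edges (f + 1) u (v :: (pvNbrsB edges u).drop (i + 1)) visB parB
                      = (match pvDfsB edges f v (visB.insert v 1) (parB.insert v u) with
                         | (some r, vis', par', f') => (some r, vis', par', f')
                         | (none, vis', par', f') => pvLoopB edges (min f' f) u ((pvNbrsB edges u).drop (i + 1)) vis' par') from by
                      simp [pvLoopB, h0]]
                rcases hd : pvDfsB edges f v (visB.insert v 1) (parB.insert v u) with ⟨res, vis', par', f'⟩
                have hf' : f' ≤ f := by
                  have := ((pvFuel_le edges f).2 v (visB.insert v 1) (parB.insert v u))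
                  rw [hd] at this
                  exact this
                cases res with
                | some r =>
                    rcases r with ⟨rv, ru⟩
                    simp [pvCont, pvExitB]
                | none =>
                    dsimp only
                    rw [Nat.min_eq_left hf', hCframe (i + 1), pvDfsFromB]
              · rw [if_neg h0, ih starts ((u, i + 1) :: st') visA visB parA parB hv hp,
                    hCframe (i + 1), hCframe i, hdrop, pvDfsFromB, pvDfsFromB,
                    show pvLoopB edges (f + 1) u (v :: (pvNbrsB edges u).drop (i + 1)) visB parB
                      = pvLoopB edges f u ((pvNbrsB edges u).drop (i + 1)) visB parB from by
                      simp [pvLoopB, h1, h0]]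

-- any cycle B returns has at least two entries
theorem pvStartsB_some_len (edges : List (String × String)) (pf : Nat) :
    ∀ (f : Nat) (starts : List String) vis par (c : List String),
      pvStartsB edges pf f starts vis par = some c → 2 ≤ c.length := by
  have hmono : ∀ (par : PySem.Dict String (Option String)) (f : Nat) (v : String) (oc : Option String) (rev : List String),
      rev.length ≤ (pvWalkB par f v oc rev).1.length := by
    intro par f
    induction f with
    | zero => intro v oc rev; cases oc <;> simp [pvWalkB]
    | succ f ihw =>
        intro v oc rev
        cases oc with
        | none => simp [pvWalkB]
        | some c =>
            simp only [pvWalkB]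
            split
            · simp
            · exact le_trans (by simp) (ihw v _ (rev ++ [c]))
  have hasm : ∀ (par : PySem.Dict String (Option String)) (v u : String), 2 ≤ (pvAssembleB par pf v u).length := by
    intro par v u
    rw [pvAssembleB]
    rcases hw : pvWalkB par pf v (some u) [] with ⟨rev, b⟩
    cases b with
    | true => simp
    | false =>
        have hne : 1 ≤ rev.length := by
          cases pf with
          | zero =>
              simp only [pvWalkB, Prod.mk.injEq, List.nil_append] at hw
              rw [← hw.1]
              simp
          | succ g =>
              simp only [pvWalkB, List.nil_append] at hw
              by_cases hc : u == v
              · rw [if_pos hc] at hw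
                cases hw
              · rw [if_neg hc] at hw
                have := hmono par g v (par.getD u none) [u]
                rw [hw] at this
                simpa using this
        simp
        omega
  intro f
  induction f using Nat.strong_induction_on with
  | _ f ih =>
      intro starts vis par c hc
      cases f with
      | zero => simp [pvStartsB] at hc
      | succ g =>
          cases starts with
          | nil => simp [pvStartsB] at hc
          | cons s rest =>
              simp only [pvStartsB] at hc
              split at hc
              · exact ih g (by omega) rest vis par c hc
              · rcases hd : pvDfsB edges g s (vis.insert s 1) par with ⟨res, vis', par', f'⟩
                rw [hd] at hc
                cases res with
                | some r =>
                    rcases r with ⟨v, u⟩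
                    simp only [] at hc
                    cases hc
                    exact hasm par' v u
                | none => exact ih (min f' g) (by omega) rest vis' par' c hc

-- a fold of constant inserts leaves every getD at that constant
theorem pv_getD_foldl_insert_const {ν : Type} (v0 : ν) :
    ∀ (l : List String) (d : PySem.Dict String ν), (∀ y, d.getD y v0 = v0) →
      ∀ x, (l.foldl (fun d n => d.insert n v0) d).getD x v0 = v0 := by
  intro l
  induction l with
  | nil => intro d h x; exact h x
  | cons n l ih =>
      intro d h x
      simp only [List.foldl_cons]
      refine ih _ (fun y => ?_) x
      rw [PySem.Dict.getD_insert]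
      split <;> simp [h]

-- the cycles found coincide
theorem pvFindCycle_eq (edges : List (String × String)) (preferredOrder : List String) :
    pvFindCycleA edges preferredOrder = pvFindCycleB edges preferredOrder := by
  unfold pvFindCycleA pvFindCycleB
  rw [pvNodes_eq]
  dsimp only
  rw [pvNodeOrder_eq]
  rw [pvLockstep edges _ _ _ []
        ((pvNodesB edges).foldl (fun d n => d.insert n (0 : Int)) PySem.Dict.empty) PySem.Dict.empty
        ((pvNodesB edges).foldl (fun d n => d.insert n (none : Option String)) PySem.Dict.empty) PySem.Dict.empty
        (fun x => by rw [pv_getD_foldl_insert_const 0 _ _ (fun y => by simp) x, PySem.Dict.getD_empty])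
        (fun x => by rw [pv_getD_foldl_insert_const none _ _ (fun y => by simp) x, PySem.Dict.getD_empty])]
  simp [pvCont]

-- dedup-then-remove equals filter-then-dedup
theorem pv_set_remove_filter {α : Type} [BEq α] [LawfulBEq α] (l : List α) (c : α) :
    (if PySem.Set.contains (PySem.Set.ofList l) c then PySem.Set.discard (PySem.Set.ofList l) c
     else PySem.Set.ofList l) = PySem.Set.ofList (l.filter (fun e => !(e == c))) := by
  have haux : ∀ (l' acc : List α),
      (l'.foldl PySem.Set.add acc).filter (fun y => !(y == c))
        = (l'.filter (fun e => !(e == c))).foldl PySem.Set.add (acc.filter (fun y => !(y == c))) := by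
    intro l'
    induction l' with
    | nil => intro acc; rfl
    | cons x l' ih =>
        intro acc
        rcases Bool.eq_false_or_eq_true (x == c) with hxc | hxc
        · rw [List.foldl_cons, ih, List.filter_cons_of_neg (by simp [hxc])]
          congr 1
          unfold PySem.Set.add
          split
          · rfl
          · rw [List.filter_append]
            simp [hxc]
        · rw [List.foldl_cons, ih, List.filter_cons_of_pos (by simp [hxc]), List.foldl_cons]
          congr 1
          unfold PySem.Set.add PySem.Set.contains
          rcases Bool.eq_false_or_eq_true (List.contains acc x) with hm | hm
          · rw [if_pos hm, if_pos (by
                rw [List.contains_eq_mem] at hm ⊢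
                simp only [decide_eq_true_eq] at hm
                simp only [decide_eq_true_eq, List.mem_filter]
                exact ⟨hm, by simp [hxc]⟩)]
          · rw [if_neg (by rw [hm]; simp), if_neg (by
                rw [List.contains_eq_mem] at hm ⊢
                simp only [decide_eq_false_iff_not] at hm
                simp only [decide_eq_true_eq, List.mem_filter]
                exact fun hmem => hm hmem.1), List.filter_append]
            simp [hxc]
  have hfil : (PySem.Set.ofList l).filter (fun y => !(y == c)) = PySem.Set.ofList (l.filter (fun e => !(e == c))) := by
    have := haux l []
    simpa [PySem.Set.ofList] using this
  by_cases h : c ∈ l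
  · have hcont : PySem.Set.contains (PySem.Set.ofList l) c = true := by
      unfold PySem.Set.contains
      rw [List.contains_eq_mem]
      simp only [decide_eq_true_eq]
      rw [PySem.Set.mem_ofList]
      exact h
    rw [if_pos hcont]
    unfold PySem.Set.discard
    exact hfil
  · have hcont : PySem.Set.contains (PySem.Set.ofList l) c = false := by
      unfold PySem.Set.contains
      rw [List.contains_eq_mem]
      simp only [decide_eq_false_iff_not]
      rw [PySem.Set.mem_ofList]
      exact h
    rw [if_neg (by rw [hcont]; simp)]
    have hid : l.filter (fun e => !(e == c)) = l := by
      refine List.filter_eq_self.mpr (fun a ha => ?_)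
      simp only [Bool.not_eq_eq_eq_not, Bool.not_true, beq_eq_false_iff_ne]
      intro hac
      exact h (hac ▸ ha)
    rw [hid]

-- A's last consecutive pair equals (cycle[-2], cycle[-1])
theorem pvClosing_eq (c : List String) (hc : 2 ≤ c.length) :
    ((PySem.List.pyGet? ((PySem.List.pyRange 0 ((c.length : Int) - 1) 1).foldl
        (fun acc i => acc ++ [(PySem.List.pyGetD c i "", PySem.List.pyGetD c (i + 1) "")]) []) (-1)).getD ("", ""))
      = ((PySem.List.pyGet? c (-2)).getD "", (PySem.List.pyGet? c (-1)).getD "") := by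
  obtain ⟨n, hn⟩ : ∃ n, c.length = n + 2 := ⟨c.length - 2, by omega⟩
  have h1 : ((c.length : Int) - 1) = ((n + 1 : Nat) : Int) := by rw [hn]; push_cast; ring
  rw [PySem.List.foldl_append_singleton_eq_map, List.nil_append, h1,
      PySem.List.pyRange_zero_natCast, List.map_map]
  have hidx1 : PySem.List.pyIdx? (n + 1) (-1) = some n := by
    simp only [PySem.List.pyIdx?]
    rw [if_neg (by omega), if_pos (by push_cast; omega)]
    congr 1
  have hidx2 : PySem.List.pyIdx? (n + 2) (-2) = some n := by
    simp only [PySem.List.pyIdx?]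
    rw [if_neg (by omega), if_pos (by push_cast; omega)]
    congr 1
  have hidx3 : PySem.List.pyIdx? (n + 2) (-1) = some (n + 1) := by
    simp only [PySem.List.pyIdx?]
    rw [if_neg (by omega), if_pos (by push_cast; omega)]
    congr 1
  simp only [PySem.List.pyGet?, List.length_map, List.length_range, hn, hidx1, hidx2, hidx3,
    Option.bind_some]
  simp only [List.getElem?_map, List.getElem?_range, Function.comp,
    show n < n + 1 from by omega, Option.map_some, Option.getD_some]
  have h2 : ((n : Int) + 1) = ((n + 1 : Nat) : Int) := by push_cast; ring
  rw [PySem.List.pyGetD_natCast, h2, PySem.List.pyGetD_natCast,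
      List.getD_eq_getElem?_getD, List.getD_eq_getElem?_getD]

-- cycle[0] with a total default equals List.getD
theorem pvEntry_eq (c : List String) : c.getD 0 "" = (PySem.List.pyGet? c 0).getD "" := by
  rw [PySem.List.pyGet?_zero, List.getD_eq_getElem?_getD]

-- ===== VERDICT (by name: the statement is the Claim_ definition above) =====
theorem UnfoldOneCycleAutomatically_spec : Claim_equal_UnfoldOneCycleAutomatically := by
  intro edges usedNodeNames preferredOrder _
  unfold Spec_UnfoldOneCycleAutomatically UnfoldOneCycleAutomatically UnfoldOneCycleAutomatically_alt
  rw [pvFindCycle_eq]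
  cases h : pvFindCycleB edges preferredOrder with
  | none => rfl
  | some cycle =>
      have hlen : 2 ≤ cycle.length := by
        unfold pvFindCycleB at h
        exact pvStartsB_some_len _ _ _ _ _ _ _ h
      simp only
      rw [pvFresh_eq, pvClosing_eq cycle hlen, pv_set_remove_filter, pvEntry_eq]
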